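-- pv_equiv track=rewrite | github.com/zewenw/course | algorithm/assignment/one/b.py | find_envelope
-- ===== SOURCE A (Python) =====
-- def find_envelope(rectangles):
--     if len(rectangles) == 0:
--         return []
--     if len(rectangles) == 1:
--         x1, x2, h = rectangles[0]
--         return [(x1, h), (x2, 0)]
--
--     mid = len(rectangles) // 2
--     left_envelope = find_envelope(rectangles[:mid])
--     right_envelope = find_envelope(rectangles[mid:])
--
--     return merge_envelopes(left_envelope, right_envelope)
--
-- def merge_envelopes(left_envelope, right_envelope):
--     i, j = 0, 0
--     left_height, right_height = 0, 0
--     output = []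
--
--     while i < len(left_envelope) and j < len(right_envelope):
--         x1 = min(left_envelope[i][0], right_envelope[j][0])
--         if left_envelope[i][0] == x1:
--             left_height = left_envelope[i][1]
--             i += 1
--         if right_envelope[j][0] == x1:
--             right_height = right_envelope[j][1]
--             j += 1
--         h = max(left_height, right_height)
--         if len(output) == 0 or h != output[-1][1]:
--             output.append((x1, h))
--
--     output += left_envelope[i:]
--     output += right_envelope[j:]
--
--     return output
-- ===== SOURCE B (Python) =====
-- def find_envelope(rectangles):
--     # Iterative postorder evaluation of the halving tree with an explicit
--     # work stack over index ranges; no recursion, no list slicing.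
--     if not rectangles:
--         return []
--     vals = []
--     work = [(0, len(rectangles), False)]
--     while work:
--         lo, hi, ready = work.pop()
--         if hi - lo == 1:
--             x1, x2, h = rectangles[lo]
--             vals.append([(x1, h), (x2, 0)])
--         elif not ready:
--             mid = lo + (hi - lo) // 2
--             work.append((lo, hi, True))
--             work.append((mid, hi, False))
--             work.append((lo, mid, False))
--         else:
--             right = vals.pop()
--             left = vals.pop()
--             vals.append(_merge(left, right))
--     return vals[0]
--
-- def _merge(left, right):
--     # staged: raw two-pointer walk (no dedup), then one collapse pass, then tails
--     raw = []
--     i = j = 0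
--     lh = rh = 0
--     while i < len(left) and j < len(right):
--         lx, rx = left[i][0], right[j][0]
--         if lx < rx:
--             lh = left[i][1]
--             i += 1
--         elif rx < lx:
--             rh = right[j][1]
--             j += 1
--         else:
--             lh = left[i][1]
--             rh = right[j][1]
--             i += 1
--             j += 1
--         raw.append((min(lx, rx), max(lh, rh)))
--     out = []
--     for p in raw:
--         if not out or p[1] != out[-1][1]:
--             out.append(p)
--     return out + left[i:] + right[j:]
-- ===== Notes on version B (the rewrite author's own statement) =====
-- stated objective: alternative
-- what changed: B replaces A's recursive divide-and-conquer (with list slicing) by an iterative postorder stack machine: an explicit work stack of index ranges and a value stack of envelopes, evaluating the same halving tree without recursion or slicing, and its merge is staged (raw two-pointer walk, then one collapse pass, then tails) instead of A's stateful dedup-while-emitting loop.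
import Mathlib
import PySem

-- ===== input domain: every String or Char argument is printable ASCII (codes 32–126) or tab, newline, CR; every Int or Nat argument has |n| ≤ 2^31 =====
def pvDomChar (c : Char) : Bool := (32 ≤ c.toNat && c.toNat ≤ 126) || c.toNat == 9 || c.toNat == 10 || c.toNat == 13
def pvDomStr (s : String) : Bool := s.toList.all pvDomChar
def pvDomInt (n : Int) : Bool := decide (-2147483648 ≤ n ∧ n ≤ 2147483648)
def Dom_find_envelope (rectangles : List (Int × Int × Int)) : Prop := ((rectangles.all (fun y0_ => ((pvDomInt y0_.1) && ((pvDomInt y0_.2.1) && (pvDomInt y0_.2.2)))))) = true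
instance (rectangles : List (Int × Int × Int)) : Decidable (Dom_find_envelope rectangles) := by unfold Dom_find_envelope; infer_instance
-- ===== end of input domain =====

-- B replaces A's recursion-with-slicing by an iterative postorder stack machine over index
-- ranges (explicit work stack + value stack), with a staged merge; objective: alternative.
-- All Lean loops carry a Nat fuel argument as a structural totality guard only; the stated
-- fuel always suffices, so it never changes a computed value.

-- ===== PORT A =====
-- 'if len(output) == 0 or h != output[-1][1]: output.append((x1, h))'
def pyEmit (x h : Int) (out : List (Int × Int)) : List (Int × Int) :=
  match out.getLast? with
  | none => out ++ [(x, h)]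
  | some q => if h ≠ q.2 then out ++ [(x, h)] else out

-- the 'while i < len(left) and j < len(right)' loop of merge_envelopes, followed by the two
-- tail appends; 'x1 = min(...)' with the two 'if ... == x1' consumptions is transcribed as the
-- three-way comparison of the heads (left smaller / right smaller / equal), which consumes
-- exactly the same elements and updates exactly the same heights.  Each iteration consumes at
-- least one element, so fuel = |ls| + |rs| (supplied by merge_envelopes) never runs out while
-- both lists are nonempty.
def pyMergeLoop : Nat → List (Int × Int) → List (Int × Int) → Int → Int →
    List (Int × Int) → List (Int × Int)
  | 0, ls, rs, _, _, out => out ++ ls ++ rs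
  | fuel + 1, (lx, lv) :: lt, (rx, rv) :: rt, lh, rh, out =>
    if lx < rx then
      pyMergeLoop fuel lt ((rx, rv) :: rt) lv rh (pyEmit (min lx rx) (max lv rh) out)
    else if rx < lx then
      pyMergeLoop fuel ((lx, lv) :: lt) rt lh rv (pyEmit (min lx rx) (max lh rv) out)
    else
      pyMergeLoop fuel lt rt lv rv (pyEmit (min lx rx) (max lv rv) out)
  | _ + 1, ls, rs, _, _, out => out ++ ls ++ rs

def merge_envelopes (left_envelope right_envelope : List (Int × Int)) : List (Int × Int) :=
  pyMergeLoop (left_envelope.length + right_envelope.length)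
    left_envelope right_envelope 0 0 []

-- the recursion of find_envelope; mid = len(rectangles) // 2 is a Nat division (length is
-- nonnegative) and the slices rectangles[:mid] / rectangles[mid:] are PySem.List.slice.
-- Recursive calls are on strictly shorter lists, so fuel = length (supplied below) suffices.
def pyFindRec : Nat → List (Int × Int × Int) → List (Int × Int)
  | 0, _ => []
  | _ + 1, [] => []
  | _ + 1, [(x1, x2, h)] => [(x1, h), (x2, 0)]
  | fuel + 1, r1 :: r2 :: rest =>
    let mid : Nat := (r1 :: r2 :: rest).length / 2
    merge_envelopes
      (pyFindRec fuel (PySem.List.slice (r1 :: r2 :: rest) none (some (mid : Int))))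
      (pyFindRec fuel (PySem.List.slice (r1 :: r2 :: rest) (some (mid : Int)) none))

def find_envelope (rectangles : List (Int × Int × Int)) : List (Int × Int) :=
  pyFindRec rectangles.length rectangles

-- ===== PORT B =====
-- the while loop of _merge: no dedup, every step appends one raw point; returns
-- (raw, left tail, right tail).  Fuel as in pyMergeLoop.
def altWalk : Nat → List (Int × Int) → List (Int × Int) → Int → Int →
    List (Int × Int) → List (Int × Int) × List (Int × Int) × List (Int × Int)
  | 0, ls, rs, _, _, raw => (raw, ls, rs)
  | fuel + 1, (lx, lv) :: lt, (rx, rv) :: rt, lh, rh, raw =>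
    if lx < rx then
      altWalk fuel lt ((rx, rv) :: rt) lv rh (raw ++ [(min lx rx, max lv rh)])
    else if rx < lx then
      altWalk fuel ((lx, lv) :: lt) rt lh rv (raw ++ [(min lx rx, max lh rv)])
    else
      altWalk fuel lt rt lv rv (raw ++ [(min lx rx, max lv rv)])
  | _ + 1, ls, rs, _, _, raw => (raw, ls, rs)

-- _merge: raw walk, then the 'for p in raw' collapse pass, then the tails
def altMerge (left right : List (Int × Int)) : List (Int × Int) :=
  match altWalk (left.length + right.length) left right 0 0 [] with
  | (raw, lt, rt) =>
    (raw.foldl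
      (fun out p =>
        match out.getLast? with
        | none => out ++ [p]
        | some q => if p.2 ≠ q.2 then out ++ [p] else out) []) ++ lt ++ rt

-- the 'while work:' loop of Source B: pop an item, handle leaf / expand / combine.
-- vals is a stack (head = most recently appended).  A range of size s is fully evaluated in
-- exactly 3·s − 2 pops, so the fuel 3·n supplied by find_envelope_alt never runs out, and the
-- '| _ => vals' arm (value-stack underflow; an IndexError in Python) is unreachable too.
def bLoop (rects : List (Int × Int × Int)) :
    Nat → List (Nat × Nat × Bool) → List (List (Int × Int)) → List (List (Int × Int))
  | 0, _, vals => vals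
  | _ + 1, [], vals => vals
  | fuel + 1, (lo, hi, ready) :: rest, vals =>
    if hi - lo = 1 then
      -- rectangles[lo]; in range on every state reachable from find_envelope_alt
      match rects.getD lo (0, 0, 0) with
      | (x1, x2, h) => bLoop rects fuel rest ([(x1, h), (x2, 0)] :: vals)
    else if ready = false then
      bLoop rects fuel
        ((lo, lo + (hi - lo) / 2, false) :: (lo + (hi - lo) / 2, hi, false) ::
          (lo, hi, true) :: rest) vals
    else
      match vals with
      | r :: l :: vs => bLoop rects fuel rest (altMerge l r :: vs)
      | _ => vals

-- 'return vals[0]'; the machine ends with exactly one value, headD [] is the totality default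
def find_envelope_alt (rectangles : List (Int × Int × Int)) : List (Int × Int) :=
  match rectangles with
  | [] => []
  | _ => (bLoop rectangles (3 * rectangles.length) [(0, rectangles.length, false)] []).headD []

-- ===== PRECONDITION & SPEC =====
def Spec_find_envelope (rectangles : List (Int × Int × Int)) (out : List (Int × Int)) : Prop := out = find_envelope_alt rectangles
instance (rectangles : List (Int × Int × Int)) (out : List (Int × Int)) : Decidable (Spec_find_envelope rectangles out) := by unfold Spec_find_envelope; infer_instance

-- ===== CLAIM (what is proved, stated in full; the proofs are below) =====
def Claim_equal_find_envelope : Prop := ∀ (rectangles : List (Int × Int × Int)), Dom_find_envelope rectangles → Spec_find_envelope rectangles (find_envelope rectangles)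

-- ===== LEMMAS AND PROOFS =====

-- the collapse step shared by pyEmit and B's collapse fold
def colStep (out : List (Int × Int)) (p : Int × Int) : List (Int × Int) :=
  match out.getLast? with
  | none => out ++ [p]
  | some q => if p.2 ≠ q.2 then out ++ [p] else out

theorem pyEmit_eq_colStep (x h : Int) (out : List (Int × Int)) :
    pyEmit x h out = colStep out (x, h) := by
  simp [pyEmit, colStep]

-- accumulator lemma for B's raw walk
theorem altWalk_acc : ∀ (fuel : Nat) (ls rs : List (Int × Int)) (lh rh : Int)
    (raw : List (Int × Int)),
    altWalk fuel ls rs lh rh raw =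
      (raw ++ (altWalk fuel ls rs lh rh []).1, (altWalk fuel ls rs lh rh []).2.1,
        (altWalk fuel ls rs lh rh []).2.2) := by
  intro fuel
  induction fuel with
  | zero => intro ls rs lh rh raw; simp [altWalk]
  | succ fuel ih =>
    intro ls rs lh rh raw
    match ls, rs with
    | [], rs => simp [altWalk]
    | (lx, lv) :: lt, [] => simp [altWalk]
    | (lx, lv) :: lt, (rx, rv) :: rt =>
      rcases lt_trichotomy lx rx with hc | hc | hc
      · have hu : ∀ (r0 : List (Int × Int)),
            altWalk (fuel + 1) ((lx, lv) :: lt) ((rx, rv) :: rt) lh rh r0 =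
              altWalk fuel lt ((rx, rv) :: rt) lv rh (r0 ++ [(min lx rx, max lv rh)]) := by
          intro r0; rw [altWalk]; simp [hc]
        rw [hu, hu, ih, ih lt ((rx, rv) :: rt) lv rh ([] ++ [(min lx rx, max lv rh)])]
        simp
      · subst hc
        have hu : ∀ (r0 : List (Int × Int)),
            altWalk (fuel + 1) ((lx, lv) :: lt) ((lx, rv) :: rt) lh rh r0 =
              altWalk fuel lt rt lv rv (r0 ++ [(min lx lx, max lv rv)]) := by
          intro r0; rw [altWalk]; simp
        rw [hu, hu, ih, ih lt rt lv rv ([] ++ [(min lx lx, max lv rv)])]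
        simp
      · have hu : ∀ (r0 : List (Int × Int)),
            altWalk (fuel + 1) ((lx, lv) :: lt) ((rx, rv) :: rt) lh rh r0 =
              altWalk fuel ((lx, lv) :: lt) rt lh rv (r0 ++ [(min lx rx, max lh rv)]) := by
          intro r0; rw [altWalk]; simp [hc, not_lt_of_gt hc]
        rw [hu, hu, ih, ih ((lx, lv) :: lt) rt lh rv ([] ++ [(min lx rx, max lh rv)])]
        simp

-- A's merge loop = collapse-fold over B's raw walk output, then the tails (same fuel)
theorem pyMergeLoop_eq : ∀ (fuel : Nat) (ls rs : List (Int × Int)) (lh rh : Int)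
    (out : List (Int × Int)),
    pyMergeLoop fuel ls rs lh rh out =
      ((altWalk fuel ls rs lh rh []).1.foldl colStep out)
        ++ (altWalk fuel ls rs lh rh []).2.1 ++ (altWalk fuel ls rs lh rh []).2.2 := by
  intro fuel
  induction fuel with
  | zero => intro ls rs lh rh out; simp [pyMergeLoop, altWalk]
  | succ fuel ih =>
    intro ls rs lh rh out
    match ls, rs with
    | [], rs => simp [pyMergeLoop, altWalk]
    | (lx, lv) :: lt, [] => simp [pyMergeLoop, altWalk]
    | (lx, lv) :: lt, (rx, rv) :: rt =>
      rcases lt_trichotomy lx rx with hc | hc | hc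
      · rw [pyMergeLoop]; simp only [hc, if_pos]
        rw [pyEmit_eq_colStep, ih]
        conv_rhs => rw [altWalk]
        simp only [hc, if_pos]
        rw [altWalk_acc fuel lt ((rx, rv) :: rt) lv rh ([] ++ [(min lx rx, max lv rh)])]
        simp
      · subst hc
        rw [pyMergeLoop]; simp only [lt_irrefl, if_neg, not_false_iff]
        rw [pyEmit_eq_colStep, ih]
        conv_rhs => rw [altWalk]
        simp only [lt_irrefl, ite_false]
        rw [altWalk_acc fuel lt rt lv rv ([] ++ [(min lx lx, max lv rv)])]
        simp
      · rw [pyMergeLoop]; simp only [hc, not_lt_of_gt hc, if_pos, ite_false]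
        rw [pyEmit_eq_colStep, ih]
        conv_rhs => rw [altWalk]
        simp only [hc, not_lt_of_gt hc, ite_false, ite_true]
        rw [altWalk_acc fuel ((lx, lv) :: lt) rt lh rv ([] ++ [(min lx rx, max lh rv)])]
        simp

theorem merge_eq (l r : List (Int × Int)) : merge_envelopes l r = altMerge l r := by
  rw [merge_envelopes, altMerge.eq_def, pyMergeLoop_eq (l.length + r.length) l r 0 0 []]
  rcases h : altWalk (l.length + r.length) l r 0 0 [] with ⟨raw, t1, t2⟩
  rfl

-- pyFindRec ignores any surplus fuel
theorem pyFindRec_fuel : ∀ (fuel fuel' : Nat) (l : List (Int × Int × Int)),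
    l.length ≤ fuel → l.length ≤ fuel' → pyFindRec fuel l = pyFindRec fuel' l := by
  intro fuel
  induction fuel with
  | zero =>
    intro fuel' l hf hf'
    have : l = [] := by cases l <;> simp_all
    subst this
    cases fuel' <;> rfl
  | succ fuel ih =>
    intro fuel' l hf hf'
    match l, fuel' with
    | [], f' => cases f' <;> rfl
    | [(x1, x2, h)], 0 => simp at hf'
    | [(x1, x2, h)], f' + 1 => rfl
    | r1 :: r2 :: rest, 0 => simp at hf'
    | r1 :: r2 :: rest, f' + 1 =>
      rw [pyFindRec, pyFindRec]
      simp only [PySem.List.slice_to_natCast, PySem.List.slice_from_natCast]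
      rw [ih f' _ (by simp [List.length_take] at hf ⊢; omega)
            (by simp [List.length_take] at hf' ⊢; omega),
          ih f' _ (by simp [List.length_drop] at hf ⊢; omega)
            (by simp [List.length_drop] at hf' ⊢; omega)]

-- A's port at length ≥ 2, with the slices rewritten to take/drop
theorem findA_split (l : List (Int × Int × Int)) (h2 : 2 ≤ l.length) :
    find_envelope l =
      merge_envelopes (find_envelope (l.take (l.length / 2)))
        (find_envelope (l.drop (l.length / 2))) := by
  match l with
  | [] => simp at h2
  | [a] => simp at h2
  | a :: b :: tl =>
    rw [find_envelope, find_envelope, find_envelope]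
    rw [show (a :: b :: tl).length = tl.length + 2 by simp, pyFindRec]
    simp only [PySem.List.slice_to_natCast, PySem.List.slice_from_natCast]
    rw [show (a :: b :: tl).length = tl.length + 2 by simp]
    rw [pyFindRec_fuel (tl.length + 1) ((a :: b :: tl).take ((tl.length + 2) / 2)).length _
          (by simp only [List.length_take, List.length_cons]; omega) (le_refl _),
        pyFindRec_fuel (tl.length + 1) ((a :: b :: tl).drop ((tl.length + 2) / 2)).length _
          (by simp only [List.length_drop, List.length_cons]; omega) (le_refl _)]

-- the machine, run with enough fuel on a pending range, pushes A's envelope of that range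
-- (a range of size s needs exactly 3·s − 2 pops)
theorem bLoop_range : ∀ (s : Nat) (rects : List (Int × Int × Int)) (lo hi : Nat),
    hi - lo = s → lo < hi → hi ≤ rects.length →
    ∀ (fuel : Nat) (work : List (Nat × Nat × Bool)) (vals : List (List (Int × Int))),
    bLoop rects (fuel + (3 * (hi - lo) - 2)) ((lo, hi, false) :: work) vals =
      bLoop rects fuel work (find_envelope ((rects.drop lo).take (hi - lo)) :: vals) := by
  intro s
  induction s using Nat.strong_induction_on with
  | _ s ih =>
    intro rects lo hi hs hlt hle fuel work vals
    by_cases h1 : hi - lo = 1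
    · have hlo : lo < rects.length := by omega
      have htake : (rects.drop lo).take 1 = [rects[lo]] := by
        rw [List.drop_eq_getElem_cons hlo]; rfl
      rw [show fuel + (3 * (hi - lo) - 2) = fuel + 1 by omega, bLoop.eq_def]
      simp only [h1, ite_true]
      have hgetD : rects.getD lo (0, 0, 0) = rects[lo] := List.getD_eq_getElem rects _ hlo
      rw [htake, hgetD]
      rcases hr : rects[lo] with ⟨x1, x2, h⟩
      rw [find_envelope]
      rfl
    · rw [show fuel + (3 * (hi - lo) - 2) =
          (((fuel + 1) + (3 * (hi - (lo + (hi - lo) / 2)) - 2))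
            + (3 * (lo + (hi - lo) / 2 - lo) - 2)) + 1 by omega, bLoop.eq_def]
      simp only [if_neg h1, ite_true]
      rw [ih (lo + (hi - lo) / 2 - lo) (by omega) rects lo (lo + (hi - lo) / 2) rfl
            (by omega) (by omega),
          ih (hi - (lo + (hi - lo) / 2)) (by omega) rects (lo + (hi - lo) / 2) hi rfl
            (by omega) hle]
      rw [bLoop.eq_def]
      simp only [if_neg h1, Bool.true_eq_false, ite_false]
      congr 1
      rw [← merge_eq]
      have hLlen : ((rects.drop lo).take (hi - lo)).length = hi - lo := by
        rw [List.length_take, List.length_drop]; omega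
      rw [findA_split ((rects.drop lo).take (hi - lo)) (by omega)]
      have e1 : ((rects.drop lo).take (hi - lo)).take
            (((rects.drop lo).take (hi - lo)).length / 2) =
          (rects.drop lo).take (lo + (hi - lo) / 2 - lo) := by
        rw [hLlen, List.take_take]
        congr 1
        omega
      have e2 : ((rects.drop lo).take (hi - lo)).drop
            (((rects.drop lo).take (hi - lo)).length / 2) =
          (rects.drop (lo + (hi - lo) / 2)).take (hi - (lo + (hi - lo) / 2)) := by
        rw [hLlen, List.drop_take, List.drop_drop]
        congr 1; omega
      rw [e1, e2]

-- ===== VERDICT (by name: the statement is the Claim_ definition above) =====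
theorem find_envelope_spec : Claim_equal_find_envelope := by
  intro rects _
  unfold Spec_find_envelope find_envelope_alt
  match rects with
  | [] => rw [find_envelope]; rfl
  | r :: rs =>
    rw [show 3 * (r :: rs).length = 2 + (3 * ((r :: rs).length - 0) - 2) by
          simp; omega,
        bLoop_range (r :: rs).length (r :: rs) 0 (r :: rs).length (by omega) (by simp)
          (le_refl _)]
    simp [bLoop]
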